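-- pv_equiv track=rewrite | github.com/AdorablePuddle/Base26API | Base26API/quickstart/app/app.py | base26to10
-- ===== SOURCE A (Python) =====
-- def to10digit(value : str):
--     return ord(value) - ord("a")
--
-- def base26to10(value : str):
--     output = 0
--     for digit in value[::-1]:
--         if (ord(digit) - ord('a')) not in range(26):
--             continue
--         output *= 26
--         output += to10digit(digit)
--     return output
-- ===== SOURCE B (Python) =====
-- def base26to10(value: str):
--     values = [ord(c) - ord('a') for c in value if 0 <= ord(c) - ord('a') <= 25]
--     total = 0
--     weight = 1
--     for v in values:
--         total += v * weight
--         weight *= 26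
--     return total
-- ===== Notes on version B (the rewrite author's own statement) =====
-- stated objective: alternative
-- what changed: Replaces A's reverse-the-string Horner loop (with an inline skip) by a filter-then-weighted-sum: first collect the valid digit values left to right, then one forward pass summing v*weight with a running weight of 26**i.
import Mathlib
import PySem

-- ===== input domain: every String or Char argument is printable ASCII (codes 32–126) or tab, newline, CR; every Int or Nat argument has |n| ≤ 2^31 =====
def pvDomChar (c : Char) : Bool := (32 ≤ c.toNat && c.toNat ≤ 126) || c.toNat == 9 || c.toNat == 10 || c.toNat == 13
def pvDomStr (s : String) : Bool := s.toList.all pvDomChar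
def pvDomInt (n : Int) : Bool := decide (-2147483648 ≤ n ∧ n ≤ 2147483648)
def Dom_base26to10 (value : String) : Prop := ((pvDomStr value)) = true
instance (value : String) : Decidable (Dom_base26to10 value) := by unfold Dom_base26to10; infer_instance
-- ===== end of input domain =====

-- B changes A's reverse-then-Horner loop into a filter-then-positional-weighted-sum (simpler decomposition, same cost).

-- ===== PORT A =====
def to10digit (value : Char) : Int := (value.toNat : Int) - 97

-- value[::-1] is exactly the reversed character list (PySem.Str.slice?_none_none_neg_one);
-- '(ord(digit) - ord('a')) not in range(26)' + continue keeps exactly 0 ≤ d < 26.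
def base26to10 (value : String) : Int :=
  value.toList.reverse.foldl
    (fun output digit =>
      if 0 ≤ (digit.toNat : Int) - 97 ∧ (digit.toNat : Int) - 97 < 26 then
        output * 26 + to10digit digit
      else output) 0

-- ===== PORT B =====
def base26to10_alt (value : String) : Int :=
  let values := value.toList.filterMap
    (fun c => if 0 ≤ (c.toNat : Int) - 97 ∧ (c.toNat : Int) - 97 ≤ 25
              then some ((c.toNat : Int) - 97) else none)
  (values.foldl (fun (p : Int × Int) v => (p.1 + v * p.2, p.2 * 26)) (0, 1)).1

-- ===== PRECONDITION & SPEC =====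
def Spec_base26to10 (value : String) (out : Int) : Prop := out = base26to10_alt value
instance (value : String) (out : Int) : Decidable (Spec_base26to10 value out) := by unfold Spec_base26to10; infer_instance

-- ===== CLAIM (what is proved, stated in full; the proofs are below) =====
def Claim_equal_base26to10 : Prop := ∀ (value : String), Dom_base26to10 value → Spec_base26to10 value (base26to10 value)

-- ===== LEMMAS AND PROOFS =====

-- little-endian value of a digit list: head has weight 26^0
def pvH : List Int → Int
  | [] => 0
  | d :: t => d + 26 * pvH t

def pvVals (l : List Char) : List Int :=
  l.filterMap (fun c => if 0 ≤ (c.toNat : Int) - 97 ∧ (c.toNat : Int) - 97 ≤ 25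
                        then some ((c.toNat : Int) - 97) else none)

-- B's running-weight sum computes pvH
theorem pvB_eq_H (vs : List Int) (a w : Int) :
    (vs.foldl (fun (p : Int × Int) v => (p.1 + v * p.2, p.2 * 26)) (a, w)).1
      = a + w * pvH vs := by
  induction vs generalizing a w with
  | nil => simp [pvH]
  | cons d t ih =>
    rw [List.foldl_cons, ih, pvH]
    ring

-- A's Horner fold over the reversed list, characterized via pvVals
theorem pvA_eq (l : List Char) (o : Int) :
    l.reverse.foldl
      (fun output digit =>
        if 0 ≤ (digit.toNat : Int) - 97 ∧ (digit.toNat : Int) - 97 < 26 then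
          output * 26 + to10digit digit
        else output) o
      = o * 26 ^ (pvVals l).length + pvH (pvVals l) := by
  induction l generalizing o with
  | nil => simp [pvVals, pvH]
  | cons c t ih =>
    rw [List.reverse_cons, List.foldl_append, ih o, List.foldl_cons, List.foldl_nil]
    by_cases h : 0 ≤ (c.toNat : Int) - 97 ∧ (c.toNat : Int) - 97 < 26
    · rw [if_pos h]
      have hv : pvVals (c :: t) = ((c.toNat : Int) - 97) :: pvVals t := by
        simp only [pvVals, List.filterMap_cons]
        rw [if_pos ⟨h.1, by omega⟩]
      rw [hv, pvH, to10digit]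
      simp [List.length_cons, pow_succ]
      ring
    · rw [if_neg h]
      have hv : pvVals (c :: t) = pvVals t := by
        simp only [pvVals, List.filterMap_cons]
        rw [if_neg (by omega)]
      rw [hv]

-- ===== VERDICT (by name: the statement is the Claim_ definition above) =====
theorem base26to10_spec : Claim_equal_base26to10 := by
  intro value _
  unfold Spec_base26to10 base26to10 base26to10_alt
  rw [pvA_eq, pvB_eq_H]
  simp [pvVals]
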